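-- pv_equiv track=rewrite | github.com/arcosoph/nanowakeword | nanowakeword/data/generator/adversarial_texts.py | phonemes_to_plain_text
-- ===== SOURCE A (Python) =====
-- from typing import List
-- from typing import List
--
-- def phonemes_to_plain_text(phonemes: List[str]) -> str:
--     words = []
--     current = []
--
--     for p in phonemes:
--         if p == ' ':
--             if current:
--                 words.append("".join(current))
--                 current = []
--         else:
--             current.append(p)
--
--     if current:
--         words.append("".join(current))
--
--     return " ".join(words)
-- ===== SOURCE B (Python) =====
-- def phonemes_to_plain_text(phonemes):
--     words = []
--     i = 0
--     n = len(phonemes)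
--     while i < n:
--         if phonemes[i] == ' ':
--             i += 1
--         else:
--             j = i
--             while j < n and phonemes[j] != ' ':
--                 j += 1
--             words.append(''.join(phonemes[i:j]))
--             i = j
--     return ' '.join(words)
-- ===== Notes on version B (the rewrite author's own statement) =====
-- stated objective: alternative
-- what changed: Replaces A's single pass with a mutable 'current' buffer flushed on each space by a two-pointer scan: skip spaces, find the end of each run of non-space phonemes, join the slice directly; no word-in-progress accumulator is maintained.
import Mathlib
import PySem

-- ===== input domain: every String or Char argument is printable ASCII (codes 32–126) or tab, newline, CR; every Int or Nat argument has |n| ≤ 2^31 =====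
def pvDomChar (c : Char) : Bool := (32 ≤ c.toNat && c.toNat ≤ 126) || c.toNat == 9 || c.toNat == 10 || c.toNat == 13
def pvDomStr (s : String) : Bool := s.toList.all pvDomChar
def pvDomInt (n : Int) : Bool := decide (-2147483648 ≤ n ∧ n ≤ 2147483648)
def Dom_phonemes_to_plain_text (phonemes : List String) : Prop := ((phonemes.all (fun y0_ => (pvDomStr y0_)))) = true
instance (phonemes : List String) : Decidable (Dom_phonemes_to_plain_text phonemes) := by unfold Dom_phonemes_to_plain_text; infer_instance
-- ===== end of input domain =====

-- B replaces A's flush-on-space accumulator loop with a two-pointer scan over runs of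
-- non-space phonemes (alternative decomposition, same cost).


-- ===== PORT A =====
-- A's loop: state (words, current); a space flushes the nonempty current buffer.
def pvAStep (st : List String × List String) (p : String) : List String × List String :=
  if p = " " then
    if st.2.isEmpty then st else (st.1 ++ [PySem.Str.join "" st.2], [])
  else (st.1, st.2 ++ [p])

-- the trailing `if current: words.append(...)` flush after A's loop
def pvFinish (st : List String × List String) : List String :=
  if st.2.isEmpty then st.1 else st.1 ++ [PySem.Str.join "" st.2]

def phonemes_to_plain_text (phonemes : List String) : String :=
  PySem.Str.join " " (pvFinish (phonemes.foldl pvAStep ([], [])))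

-- ===== PORT B =====
-- B's scan: skip a space, else take the whole run of non-space phonemes as one word.
def pvAltWords : List String → List String
  | [] => []
  | p :: rest =>
    if p = " " then pvAltWords rest
    else PySem.Str.join "" (p :: rest.takeWhile (· ≠ " ")) :: pvAltWords (rest.dropWhile (· ≠ " "))
termination_by l => l.length
decreasing_by
  all_goals simp only [List.length_cons]
  · omega
  · exact Nat.lt_succ_of_le (List.length_dropWhile_le _ _)

def phonemes_to_plain_text_alt (phonemes : List String) : String :=
  PySem.Str.join " " (pvAltWords phonemes)

-- ===== PRECONDITION & SPEC =====
def Spec_phonemes_to_plain_text (phonemes : List String) (out : String) : Prop := out = phonemes_to_plain_text_alt phonemes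
instance (phonemes : List String) (out : String) : Decidable (Spec_phonemes_to_plain_text phonemes out) := by unfold Spec_phonemes_to_plain_text; infer_instance

-- ===== CLAIM (what is proved, stated in full; the proofs are below) =====
def Claim_equal_phonemes_to_plain_text : Prop := ∀ (phonemes : List String), Dom_phonemes_to_plain_text phonemes → Spec_phonemes_to_plain_text phonemes (phonemes_to_plain_text phonemes)

-- ===== LEMMAS AND PROOFS =====

-- the word list A's loop still produces from a pending buffer `current` and remaining input
def pvBW (current : List String) : List String → List String
  | [] => if current.isEmpty then [] else [PySem.Str.join "" current]
  | p :: rest =>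
    if p = " " then
      if current.isEmpty then pvBW [] rest else PySem.Str.join "" current :: pvBW [] rest
    else pvBW (current ++ [p]) rest

theorem pvBW_foldl (ph : List String) : ∀ (words current : List String),
    pvFinish (ph.foldl pvAStep (words, current)) = words ++ pvBW current ph := by
  induction ph with
  | nil => intro words current; by_cases h : current.isEmpty <;> simp [pvFinish, pvBW, h]
  | cons p rest ih =>
    intro words current
    rw [List.foldl_cons]
    by_cases hp : p = " "
    · by_cases hc : current.isEmpty
      · have hc' : current = [] := List.isEmpty_iff.mp hc
        simp only [pvAStep, pvBW, hp, hc', List.isEmpty_nil, ite_true]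
        exact ih words []
      · simp only [pvAStep, pvBW, hp, hc, ite_true, ite_false, Bool.false_eq_true]
        rw [ih (words ++ [PySem.Str.join "" current]) []]
        simp
    · simp only [pvAStep, pvBW, hp, ite_false]
      exact ih words (current ++ [p])

theorem pvBW_alt (ph : List String) : ∀ (current : List String),
    pvBW current ph =
      if current.isEmpty then pvAltWords ph
      else PySem.Str.join "" (current ++ ph.takeWhile (· ≠ " ")) :: pvAltWords (ph.dropWhile (· ≠ " ")) := by
  induction ph with
  | nil => intro current; by_cases h : current.isEmpty <;> simp [pvBW, pvAltWords, h]
  | cons p rest ih =>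
    intro current
    by_cases hp : p = " "
    · by_cases hc : current.isEmpty
      · simp [pvBW, pvAltWords, hp, hc, ih]
      · rw [pvBW, if_pos hp, if_neg hc, ih []]
        simp [pvAltWords, hp, hc]
    · by_cases hc : current.isEmpty
      · have hc' : current = [] := List.isEmpty_iff.mp hc
        simp [pvBW, pvAltWords, hp, hc', ih]
      · simp [pvBW, hp, hc, ih]

-- ===== VERDICT (by name: the statement is the Claim_ definition above) =====
theorem phonemes_to_plain_text_spec : Claim_equal_phonemes_to_plain_text := by
  intro phonemes _
  unfold Spec_phonemes_to_plain_text phonemes_to_plain_text phonemes_to_plain_text_alt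
  rw [pvBW_foldl phonemes [] [], pvBW_alt phonemes []]
  simp
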